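-- pv_equiv track=rewrite | github.com/DrunkenZealnut/SafeFactory | src/semantic_chunker.py | _distribute_lines_by_blocks
-- ===== SOURCE A (Python) =====
-- from typing import List, Dict, Optional, Tuple
--
-- def _distribute_lines_by_blocks(
--     start_line: int,
--     end_line: int,
--     start_page: int,
--     end_page: int,
--     page_block_counts: Dict[int, int]
-- ) -> Dict[int, int]:
--     """
--     Distribute lines between start_line..end_line across pages start_page..end_page
--     proportionally based on block counts from page_stats.
--
--     Returns:
--         Dict mapping line_index → page_id
--     """
--     result: Dict[int, int] = {}
--     total_lines = end_line - start_line + 1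
--
--     if total_lines <= 0:
--         return result
--
--     if start_page > end_page:
--         for i in range(start_line, end_line + 1):
--             result[i] = start_page
--         return result
--
--     if start_page == end_page:
--         for i in range(start_line, end_line + 1):
--             result[i] = start_page
--         return result
--
--     # Collect block counts for pages in range
--     pages = list(range(start_page, end_page + 1))
--     blocks = [page_block_counts.get(p, 1) for p in pages]
--     total_blocks = sum(blocks)
--
--     if total_blocks == 0:
--         total_blocks = len(pages)
--         blocks = [1] * len(pages)
--
--     # Distribute lines proportionally
--     current_line = start_line
--     for i, page_id in enumerate(pages):
--         if i == len(pages) - 1: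
--             # Last page gets remaining lines
--             line_count = end_line - current_line + 1
--         else:
--             line_count = max(1, round(total_lines * blocks[i] / total_blocks))
--
--         for j in range(line_count):
--             line_idx = current_line + j
--             if line_idx > end_line:
--                 break
--             result[line_idx] = page_id
--
--         current_line += line_count
--         if current_line > end_line:
--             break
--
--     # Fill any remaining unassigned lines with end_page
--     for i in range(start_line, end_line + 1):
--         if i not in result:
--             result[i] = end_page
--
--     return result
-- ===== SOURCE B (Python) =====
-- def _distribute_lines_by_blocks(
--     start_line: int,
--     end_line: int,
--     start_page: int,
--     end_page: int,
--     page_block_counts: dict,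
-- ) -> dict:
--     """Classify each line against a prefix table of page start positions,
--     located by binary search, instead of emitting consecutive runs page by page."""
--     total_lines = end_line - start_line + 1
--     if total_lines <= 0:
--         return {}
--
--     if start_page >= end_page:
--         return {i: start_page for i in range(start_line, end_line + 1)}
--
--     pages = list(range(start_page, end_page + 1))
--     blocks = [page_block_counts.get(p, 1) for p in pages]
--     total_blocks = sum(blocks)
--     if total_blocks == 0:
--         total_blocks = len(pages)
--         blocks = [1] * len(pages)
--
--     # boundaries[k] = first line of page k; strictly increasing, boundaries[0] = start_line
--     boundaries = [start_line]
--     for bl in blocks[:-1]: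
--         boundaries.append(boundaries[-1] + max(1, round(total_lines * bl / total_blocks)))
--
--     return {i: pages[_bisect_right(boundaries, i) - 1]
--             for i in range(start_line, end_line + 1)}
--
--
-- def _bisect_right(bs, x):
--     lo, hi = 0, len(bs)
--     while lo < hi:
--         mid = (lo + hi) // 2
--         if bs[mid] <= x:
--             lo = mid + 1
--         else:
--             hi = mid
--     return lo
-- ===== Notes on version B (the rewrite author's own statement) =====
-- stated objective: alternative
-- what changed: A emits consecutive runs of lines page by page with a mutable cursor, an inner per-page line loop, break-outs and a final fill pass; B precomputes a prefix table of page start positions and classifies each line independently by binary search into that table.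
import Mathlib
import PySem

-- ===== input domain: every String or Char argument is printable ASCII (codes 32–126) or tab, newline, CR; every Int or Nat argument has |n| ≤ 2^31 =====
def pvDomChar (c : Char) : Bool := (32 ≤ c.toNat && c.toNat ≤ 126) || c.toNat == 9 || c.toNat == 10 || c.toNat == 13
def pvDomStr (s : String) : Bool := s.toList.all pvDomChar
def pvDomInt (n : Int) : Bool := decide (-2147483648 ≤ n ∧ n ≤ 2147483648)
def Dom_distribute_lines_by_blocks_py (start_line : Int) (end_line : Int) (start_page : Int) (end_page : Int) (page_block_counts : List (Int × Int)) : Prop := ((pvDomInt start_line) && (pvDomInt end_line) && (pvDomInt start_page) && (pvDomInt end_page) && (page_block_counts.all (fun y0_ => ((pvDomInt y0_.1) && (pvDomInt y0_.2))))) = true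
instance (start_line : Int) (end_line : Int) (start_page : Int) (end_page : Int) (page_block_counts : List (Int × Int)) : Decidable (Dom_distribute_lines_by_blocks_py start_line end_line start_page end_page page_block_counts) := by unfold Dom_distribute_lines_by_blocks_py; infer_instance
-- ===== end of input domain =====

-- B replaces A's run-emitting page loop (with inner line loop and break) by a prefix table of
-- page start positions and a per-line binary-search classification; objective: alternative.

-- ===== shared helper: exact emulation of Python's round(a / b) on ints =====
-- Python computes a/b as the correctly rounded IEEE double of the exact quotient, then round()
-- applies half-even rounding to an integer.  pvRNE p q = nearest-even integer to p/q (p, q Nats).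
def pvRNE (p q : Nat) : Nat :=
  let d := p / q
  let r := p % q
  if 2 * r < q then d else if q < 2 * r then d + 1 else if d % 2 = 0 then d else d + 1

-- exact integer model of Python's round(a / b) (b ≠ 0 on every reached call; 0 is a safe default)
def pyRoundDiv (a b : Int) : Int :=
  if a = 0 ∨ b = 0 then 0 else
  let s : Int := if (decide (0 < a)) = (decide (0 < b)) then 1 else -1
  let A := a.natAbs
  let B := b.natAbs
  let q := (A * 2 ^ 64) / B
  let e : Int := (Nat.log2 q : Int) - 64
  let t : Int := 52 - e
  let m := if 0 ≤ t then pvRNE (A * 2 ^ t.toNat) B else pvRNE A (B * 2 ^ (-t).toNat)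
  let m2 := if m = 2 ^ 53 then 2 ^ 52 else m
  let e2 := if m = 2 ^ 53 then e + 1 else e
  let out : Nat := if 52 ≤ e2 then m2 * 2 ^ (e2 - 52).toNat else pvRNE m2 (2 ^ (52 - e2).toNat)
  s * (out : Int)

-- ===== PORT A =====
-- inner 'for j in range(line_count)' with its 'if line_idx > end_line: break'
def aInner (res : PySem.Dict Int Int) (line_idx end_line page_id : Int) : Nat → PySem.Dict Int Int
  | 0 => res
  | n + 1 =>
    if end_line < line_idx then res
    else aInner (res.insert line_idx page_id) (line_idx + 1) end_line page_id n

-- 'for i, page_id in enumerate(pages)' over the parallel lists pages/blocks (same length);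
-- 'i == len(pages) - 1' is 'remaining pages list is a singleton'; break → early return
def aLoop (total_lines total_blocks end_line : Int) :
    List Int → List Int → Int → PySem.Dict Int Int → PySem.Dict Int Int
  | p :: ps, bl :: bls, current_line, res =>
    let line_count :=
      if ps = [] then end_line - current_line + 1
      else max 1 (pyRoundDiv (total_lines * bl) total_blocks)
    let res' := aInner res current_line end_line p line_count.toNat
    let current' := current_line + line_count
    if end_line < current' then res'
    else aLoop total_lines total_blocks end_line ps bls current' res'
  | _, _, _, res => res

def distribute_lines_by_blocks_py (start_line : Int) (end_line : Int) (start_page : Int)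
    (end_page : Int) (page_block_counts : List (Int × Int)) : List (Int × Int) :=
  let result : PySem.Dict Int Int := PySem.Dict.empty
  let total_lines := end_line - start_line + 1
  if total_lines ≤ 0 then result.items
  else if end_page < start_page then
    ((PySem.List.pyRange start_line (end_line + 1) 1).foldl
      (fun r i => r.insert i start_page) result).items
  else if start_page = end_page then
    ((PySem.List.pyRange start_line (end_line + 1) 1).foldl
      (fun r i => r.insert i start_page) result).items
  else
    let pages := PySem.List.pyRange start_page (end_page + 1) 1
    let blocks := pages.map (fun p => (PySem.Dict.ofList page_block_counts).getD p 1)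
    let total_blocks := blocks.foldl (· + ·) 0
    let tb := if total_blocks = 0 then (pages.length : Int) else total_blocks
    let bks := if total_blocks = 0 then List.replicate pages.length (1 : Int) else blocks
    let res := aLoop total_lines tb end_line pages bks start_line result
    -- 'fill any remaining unassigned lines with end_page'
    ((PySem.List.pyRange start_line (end_line + 1) 1).foldl
      (fun r i => if r.contains i then r else r.insert i end_page) res).items

-- ===== PORT B =====
-- hand-written bisect_right from Source B (while lo < hi …)
def bisectGo (bs : List Int) (x : Int) (lo hi : Nat) : Nat :=
  if _h : lo < hi then
    let mid := (lo + hi) / 2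
    if bs.getD mid 0 ≤ x then bisectGo bs x (mid + 1) hi else bisectGo bs x lo mid
  else lo
termination_by hi - lo
decreasing_by all_goals omega

-- 'for bl in blocks[:-1]: boundaries.append(boundaries[-1] + max(1, round(…)))'
def mkBounds (total_lines total_blocks : Int) : Int → List Int → List Int
  | _, [] => []
  | cur, bl :: rest =>
    let nxt := cur + max 1 (pyRoundDiv (total_lines * bl) total_blocks)
    nxt :: mkBounds total_lines total_blocks nxt rest

def distribute_lines_by_blocks_py_alt (start_line : Int) (end_line : Int) (start_page : Int)
    (end_page : Int) (page_block_counts : List (Int × Int)) : List (Int × Int) :=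
  let total_lines := end_line - start_line + 1
  if total_lines ≤ 0 then ([] : List (Int × Int))
  else if end_page ≤ start_page then
    ((PySem.List.pyRange start_line (end_line + 1) 1).foldl
      (fun r i => r.insert i start_page) PySem.Dict.empty).items
  else
    let pages := PySem.List.pyRange start_page (end_page + 1) 1
    let blocks := pages.map (fun p => (PySem.Dict.ofList page_block_counts).getD p 1)
    let total_blocks := blocks.foldl (· + ·) 0
    let tb := if total_blocks = 0 then (pages.length : Int) else total_blocks
    let bks := if total_blocks = 0 then List.replicate pages.length (1 : Int) else blocks
    let boundaries := start_line :: mkBounds total_lines tb start_line bks.dropLast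
    ((PySem.List.pyRange start_line (end_line + 1) 1).foldl
      (fun r i =>
        r.insert i (pages.getD (bisectGo boundaries i 0 boundaries.length - 1) 0))
      PySem.Dict.empty).items

-- ===== PRECONDITION & SPEC =====
def Spec_distribute_lines_by_blocks_py (start_line : Int) (end_line : Int) (start_page : Int) (end_page : Int) (page_block_counts : List (Int × Int)) (out : List (Int × Int)) : Prop := out = distribute_lines_by_blocks_py_alt start_line end_line start_page end_page page_block_counts
instance (start_line : Int) (end_line : Int) (start_page : Int) (end_page : Int) (page_block_counts : List (Int × Int)) (out : List (Int × Int)) : Decidable (Spec_distribute_lines_by_blocks_py start_line end_line start_page end_page page_block_counts out) := by unfold Spec_distribute_lines_by_blocks_py; infer_instance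

-- ===== CLAIM =====
def Claim_equal_distribute_lines_by_blocks_py : Prop := ∀ (start_line : Int) (end_line : Int) (start_page : Int) (end_page : Int) (page_block_counts : List (Int × Int)), Dom_distribute_lines_by_blocks_py start_line end_line start_page end_page page_block_counts → Spec_distribute_lines_by_blocks_py start_line end_line start_page end_page page_block_counts (distribute_lines_by_blocks_py start_line end_line start_page end_page page_block_counts)

-- ===== LEMMAS AND PROOFS =====

-- rank of line i against the boundary table: (number of boundaries ≤ i) - 1
def pvRk (bs : List Int) (i : Int) : Nat := bs.countP (fun b => decide (b ≤ i)) - 1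

def pvClassify (pages bs : List Int) (i : Int) : Int := pages.getD (pvRk bs i) 0


-- boundaries are strictly increasing
theorem mkBounds_chain (tl tb : Int) : ∀ (bls : List Int) (cur : Int),
    List.IsChain (· < ·) (cur :: mkBounds tl tb cur bls) := by
  intro bls
  induction bls with
  | nil => intro cur; simp [mkBounds]
  | cons bl rest ih =>
    intro cur
    simp only [mkBounds]
    rw [List.isChain_cons_cons]
    exact ⟨by have := le_max_left 1 (pyRoundDiv (tl * bl) tb); omega, ih _⟩

theorem chain_head_le {c : Int} {l : List Int} (h : List.IsChain (· < ·) (c :: l)) :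
    ∀ y ∈ c :: l, c ≤ y := by
  have hp : List.Pairwise (· < ·) (c :: l) := List.isChain_iff_pairwise.mp h
  intro y hy
  rcases List.mem_cons.mp hy with rfl | hy
  · exact le_refl _
  · exact le_of_lt ((List.pairwise_cons.mp hp).1 y hy)

theorem countP_zero_of_all_gt {l : List Int} {i : Int} (h : ∀ y ∈ l, i < y) :
    l.countP (fun b => decide (b ≤ i)) = 0 := by
  rw [List.countP_eq_zero]
  intro y hy
  simpa using not_le.mpr (h y hy)

theorem pairwise_getD_le {bs : List Int} (hs : List.Pairwise (· ≤ ·) bs) {k m : Nat}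
    (hkm : k ≤ m) (hm : m < bs.length) : bs.getD k 0 ≤ bs.getD m 0 := by
  rcases eq_or_lt_of_le hkm with rfl | hlt
  · exact le_refl _
  · rw [List.getD_eq_getElem bs 0 (lt_of_le_of_lt hkm hm), List.getD_eq_getElem bs 0 hm]
    exact List.pairwise_iff_getElem.mp hs k m (lt_of_le_of_lt hkm hm) hm hlt

theorem bisectGo_spec : ∀ (bs : List Int) (x : Int) (lo hi : Nat),
    List.Pairwise (· ≤ ·) bs → hi ≤ bs.length → lo ≤ hi →
    (∀ k, k < lo → bs.getD k 0 ≤ x) →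
    (∀ k, hi ≤ k → k < bs.length → x < bs.getD k 0) →
    (∀ k, k < bisectGo bs x lo hi → bs.getD k 0 ≤ x) ∧
      (∀ k, bisectGo bs x lo hi ≤ k → k < bs.length → x < bs.getD k 0) ∧
      bisectGo bs x lo hi ≤ hi := by
  intro bs x lo hi
  fun_induction bisectGo bs x lo hi with
  | case1 lo hi hlt mid hmid ih =>
    intro hs hhi hlh hlo hup
    have hmlt : mid < hi := by omega
    refine ih hs hhi (by omega) ?_ hup
    intro k hk
    rcases lt_or_ge k lo with hkl | hkl
    · exact hlo k hkl
    · exact le_trans (pairwise_getD_le hs (by omega) (by omega)) hmid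
  | case2 lo hi hlt mid hmid ih =>
    intro hs hhi hlh hlo hup
    have hmlt : mid < hi := by omega
    have hup' : ∀ k, mid ≤ k → k < bs.length → x < bs.getD k 0 := by
      intro k hk hklen
      rcases lt_or_ge k hi with hkh | hkh
      · exact lt_of_lt_of_le (lt_of_not_ge hmid) (pairwise_getD_le hs hk hklen)
      · exact hup k hkh hklen
    obtain ⟨a, b, c⟩ := ih hs (by omega) (by omega) hlo hup'
    exact ⟨a, b, by omega⟩
  | case3 lo hi hlt =>
    intro hs hhi hlh hlo hup
    exact ⟨hlo, fun k hk hkl => hup k (by omega) hkl, by omega⟩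

theorem countP_of_threshold : ∀ (bs : List Int) (x : Int) (r : Nat), r ≤ bs.length →
    (∀ k, k < r → bs.getD k 0 ≤ x) →
    (∀ k, r ≤ k → k < bs.length → x < bs.getD k 0) →
    bs.countP (fun b => decide (b ≤ x)) = r := by
  intro bs
  induction bs with
  | nil =>
    intro x r hr _ _
    simp only [List.length_nil, Nat.le_zero] at hr
    simp [hr]
  | cons b t ih =>
    intro x r hr hpre hpost
    cases r with
    | zero =>
      have h0 : x < b := by simpa using hpost 0 (by omega) (by simp)
      rw [List.countP_cons]
      have ht : t.countP (fun b => decide (b ≤ x)) = 0 := by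
        refine ih x 0 (by omega) (by omega) ?_
        intro k _ hk
        simpa using hpost (k + 1) (by omega) (by simpa using hk)
      simp [ht, not_le.mpr h0]
    | succ s =>
      have hb : b ≤ x := by simpa using hpre 0 (by omega)
      rw [List.countP_cons]
      have ht : t.countP (fun b => decide (b ≤ x)) = s := by
        refine ih x s (by simpa using hr) ?_ ?_
        · intro k hk; simpa using hpre (k + 1) (by omega)
        · intro k hk hklen; simpa using hpost (k + 1) (by omega) (by simpa using hklen)
      simp [ht, hb]

theorem bisect_eq_countP (bs : List Int) (x : Int) (h : List.IsChain (· < ·) bs) :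
    bisectGo bs x 0 bs.length = bs.countP (fun b => decide (b ≤ x)) := by
  have hs : List.Pairwise (· ≤ ·) bs :=
    (List.isChain_iff_pairwise.mp h).imp (fun hlt => le_of_lt hlt)
  obtain ⟨a, b, c⟩ := bisectGo_spec bs x 0 bs.length hs (le_refl _) (Nat.zero_le _) (by omega)
    (by intro k hk hklen; omega)
  exact (countP_of_threshold bs x _ c a b).symm


theorem contains_false_of_keys_lt {d : PySem.Dict Int Int} {c : Int}
    (h : ∀ k ∈ d.keys, k < c) : d.contains c = false := by
  cases hc : d.contains c with
  | false => rfl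
  | true => exact absurd (h c ((PySem.Dict.contains_iff_mem_keys d c).mp hc)) (by omega)

theorem aInner_spec (endl p : Int) : ∀ (n : Nat) (cur : Int) (res : PySem.Dict Int Int),
    (∀ k ∈ res.keys, k < cur) →
    aInner res cur endl p n =
      PySem.Dict.mk (res.items ++
        (PySem.List.pyRange cur (min (endl + 1) (cur + (n : Int))) 1).map (fun i => (i, p))) := by
  intro n
  induction n with
  | zero =>
    intro cur res _
    rw [PySem.List.pyRange_one_eq_nil (by push_cast; omega)]
    simp [aInner]
  | succ n ih =>
    intro cur res hres
    by_cases hle : endl < cur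
    · rw [PySem.List.pyRange_one_eq_nil (by omega)]
      simp [aInner, hle]
    · have hfresh : res.contains cur = false := contains_false_of_keys_lt hres
      have hcons : PySem.List.pyRange cur (min (endl + 1) (cur + ((n : Int) + 1))) 1 =
          cur :: PySem.List.pyRange (cur + 1) (min (endl + 1) (cur + 1 + (n : Int))) 1 := by
        have hmin : min (endl + 1) (cur + ((n : Int) + 1)) = min (endl + 1) (cur + 1 + (n : Int)) := by
          omega
        rw [hmin, PySem.List.pyRange_one_cons (by omega)]
      simp only [aInner, if_neg hle]
      rw [ih (cur + 1) (res.insert cur p) ?fresh]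
      case fresh =>
        intro k hk
        rcases (PySem.Dict.mem_keys_insert res cur k p).mp hk with rfl | hk
        · omega
        · have := hres k hk; omega
      rw [PySem.Dict.items_insert_of_not_contains res p hfresh]
      push_cast
      rw [hcons]
      simp

theorem pvClassify_head {p : Int} {pages tail : List Int} {cur i : Int}
    (hc : cur ≤ i) (htail : ∀ y ∈ tail, i < y) :
    pvClassify (p :: pages) (cur :: tail) i = p := by
  unfold pvClassify pvRk
  rw [List.countP_cons, countP_zero_of_all_gt htail]
  simp [hc]

theorem pvClassify_shift {p : Int} {pages : List Int} {cur cur' : Int} {rest : List Int} {i : Int}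
    (h1 : cur ≤ i) (h2 : cur' ≤ i) :
    pvClassify (p :: pages) (cur :: cur' :: rest) i = pvClassify pages (cur' :: rest) i := by
  unfold pvClassify pvRk
  have ha : List.countP (fun b => decide (b ≤ i)) (cur :: cur' :: rest)
      = List.countP (fun b => decide (b ≤ i)) rest + 1 + 1 := by
    simp [h1, h2]
  have hb : List.countP (fun b => decide (b ≤ i)) (cur' :: rest)
      = List.countP (fun b => decide (b ≤ i)) rest + 1 := by
    simp [h2]
  rw [ha, hb]
  simp

-- one-step unfolding of aLoop on cons/cons (rfl)
theorem aLoop_cons (tl tb endl p bl cur : Int) (ps bls : List Int) (res : PySem.Dict Int Int) :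
    aLoop tl tb endl (p :: ps) (bl :: bls) cur res =
      (let line_count := if ps = [] then endl - cur + 1 else max 1 (pyRoundDiv (tl * bl) tb)
       let res' := aInner res cur endl p line_count.toNat
       if endl < cur + line_count then res'
       else aLoop tl tb endl ps bls (cur + line_count) res') := rfl

theorem aLoop_spec (tl tb endl : Int) : ∀ (pages blocks : List Int) (cur : Int)
    (res : PySem.Dict Int Int),
    pages ≠ [] → pages.length = blocks.length → cur ≤ endl →
    (∀ k ∈ res.keys, k < cur) →
    aLoop tl tb endl pages blocks cur res =
      PySem.Dict.mk (res.items ++ (PySem.List.pyRange cur (endl + 1) 1).map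
        (fun i => (i, pvClassify pages (cur :: mkBounds tl tb cur blocks.dropLast) i))) := by
  intro pages
  induction pages with
  | nil => intro blocks cur res h; exact absurd rfl h
  | cons p ps ih =>
    intro blocks cur res _ hlen hcur hres
    cases blocks with
    | nil => simp at hlen
    | cons bl bls =>
    cases ps with
    | nil =>
      have hbls : bls = [] := by
        simp only [List.length_cons, List.length_nil] at hlen
        exact List.length_eq_zero_iff.mp (by omega)
      subst hbls
      simp only [aLoop_cons, if_true]
      rw [aInner_spec endl p _ cur res hres]
      have hmin : min (endl + 1) (cur + ((endl - cur + 1).toNat : Int)) = endl + 1 := by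
        rw [Int.toNat_of_nonneg (by omega)]; omega
      rw [hmin, if_pos (by omega : endl < cur + (endl - cur + 1))]
      congr 1
      congr 1
      apply List.map_congr_left
      intro i hi
      have hmem := (PySem.List.mem_pyRange_one).mp hi
      simp only [List.dropLast_singleton, mkBounds]
      rw [pvClassify_head (by omega) (by simp)]
    | cons p2 ps' =>
      cases bls with
      | nil => simp at hlen
      | cons bl2 bls' =>
      have hc1 : (1 : Int) ≤ max 1 (pyRoundDiv (tl * bl) tb) := le_max_left _ _
      set c := max 1 (pyRoundDiv (tl * bl) tb) with hc
      have hcn : ((c.toNat : Int)) = c := Int.toNat_of_nonneg (by omega)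
      have hne : (p2 :: ps' : List Int) ≠ [] := List.cons_ne_nil _ _
      rw [aLoop_cons]
      simp only [if_neg hne, ← hc]
      rw [aInner_spec endl p _ cur res hres, hcn]
      have hdrop : (bl :: bl2 :: bls').dropLast = bl :: (bl2 :: bls').dropLast := by
        simp [List.dropLast]
      have hbounds : mkBounds tl tb cur ((bl :: bl2 :: bls').dropLast)
          = (cur + c) :: mkBounds tl tb (cur + c) ((bl2 :: bls').dropLast) := by
        rw [hdrop]; simp only [mkBounds, ← hc]
      have hchain2 : List.IsChain (· < ·)
          ((cur + c) :: mkBounds tl tb (cur + c) ((bl2 :: bls').dropLast)) :=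
        mkBounds_chain tl tb _ _
      by_cases hov : endl < cur + c
      · have hmin : min (endl + 1) (cur + c) = endl + 1 := by omega
        rw [hmin, if_pos hov]
        congr 1
        congr 1
        apply List.map_congr_left
        intro i hi
        have hmem := (PySem.List.mem_pyRange_one).mp hi
        rw [hbounds]
        rw [pvClassify_head (by omega) ?tail]
        case tail =>
          intro y hy
          have := chain_head_le hchain2 y hy
          omega
      · have hmin : min (endl + 1) (cur + c) = cur + c := by omega
        rw [hmin, if_neg hov]
        rw [ih (bl2 :: bls') (cur + c) _ hne (by simp only [List.length_cons] at hlen ⊢; omega) (by omega) ?keys]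
        case keys =>
          intro k hk
          rw [PySem.Dict.keys_mk, List.map_append, List.map_map, List.mem_append] at hk
          rcases hk with hk | hk
          · have : k ∈ res.keys := hk
            have := hres k this
            omega
          · simp only [List.mem_map, Function.comp] at hk
            obtain ⟨i, hi, rfl⟩ := hk
            have := (PySem.List.mem_pyRange_one).mp hi
            omega
        congr 1
        have hitems : (PySem.Dict.mk (res.items ++
            (PySem.List.pyRange cur (cur + c) 1).map (fun i => (i, p)))).items
            = res.items ++ (PySem.List.pyRange cur (cur + c) 1).map (fun i => (i, p)) := rfl
        rw [hitems, List.append_assoc]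
        congr 1
        rw [PySem.List.pyRange_one_append cur (cur + c) (endl + 1) (by omega) (by omega),
          List.map_append]
        congr 1
        · apply List.map_congr_left
          intro i hi
          have hmem := (PySem.List.mem_pyRange_one).mp hi
          rw [hbounds, pvClassify_head (by omega) ?tail2]
          case tail2 =>
            intro y hy
            have := chain_head_le hchain2 y hy
            omega
        · apply List.map_congr_left
          intro i hi
          have hmem := (PySem.List.mem_pyRange_one).mp hi
          rw [hbounds, pvClassify_shift (by omega) (by omega)]


theorem foldl_fill_id : ∀ (l : List Int) (r : PySem.Dict Int Int) (v : Int),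
    (∀ i ∈ l, r.contains i = true) →
    l.foldl (fun r i => if r.contains i then r else r.insert i v) r = r := by
  intro l
  induction l with
  | nil => intro r v _; rfl
  | cons a t ih =>
    intro r v h
    simp only [List.foldl_cons, if_pos (h a (List.mem_cons_self))]
    exact ih r v (fun i hi => h i (List.mem_cons_of_mem a hi))

theorem foldl_insert_range (f : Int → Int) (b : Int) : ∀ (n : Nat) (a : Int)
    (res : PySem.Dict Int Int), (b - a).toNat = n →
    (∀ k ∈ res.keys, k < a) →
    (PySem.List.pyRange a b 1).foldl (fun r i => r.insert i (f i)) res =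
      PySem.Dict.mk (res.items ++ (PySem.List.pyRange a b 1).map (fun i => (i, f i))) := by
  intro n
  induction n with
  | zero =>
    intro a res hn _
    rw [PySem.List.pyRange_one_eq_nil (by omega)]
    simp
  | succ n ih =>
    intro a res hn hres
    rw [PySem.List.pyRange_one_cons (by omega)]
    simp only [List.foldl_cons, List.map_cons]
    rw [ih (a + 1) (res.insert a (f a)) (by omega) ?keys]
    case keys =>
      intro k hk
      rcases (PySem.Dict.mem_keys_insert res a k (f a)).mp hk with rfl | hk
      · omega
      · have := hres k hk; omega
    rw [PySem.Dict.items_insert_of_not_contains res (f a) (contains_false_of_keys_lt hres)]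
    simp

-- the A-side fill loop is a no-op and both sides reduce to the classified line list
theorem main_branch (start_line end_line end_page tl tb : Int) (pages bks : List Int)
    (h1 : start_line ≤ end_line) (hne : pages ≠ []) (hlen : pages.length = bks.length) :
    ((PySem.List.pyRange start_line (end_line + 1) 1).foldl
        (fun r i => if r.contains i then r else r.insert i end_page)
        (aLoop tl tb end_line pages bks start_line PySem.Dict.empty)).items
      = ((PySem.List.pyRange start_line (end_line + 1) 1).foldl
          (fun r i => r.insert i
            (pages.getD (bisectGo (start_line :: mkBounds tl tb start_line bks.dropLast) i 0
              (start_line :: mkBounds tl tb start_line bks.dropLast).length - 1) 0))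
          PySem.Dict.empty).items := by
  have hchain : List.IsChain (· < ·) (start_line :: mkBounds tl tb start_line bks.dropLast) :=
    mkBounds_chain tl tb _ _
  rw [aLoop_spec tl tb end_line pages bks start_line PySem.Dict.empty hne hlen h1
      (by simp [PySem.Dict.keys_empty])]
  rw [foldl_insert_range _ (end_line + 1) (end_line + 1 - start_line).toNat start_line
      PySem.Dict.empty rfl (by simp [PySem.Dict.keys_empty])]
  rw [foldl_fill_id _ _ _ ?contains]
  case contains =>
    intro i hi
    rw [PySem.Dict.contains_iff_mem_keys, PySem.Dict.keys_mk]
    rw [show (PySem.Dict.empty : PySem.Dict Int Int).items = [] from rfl,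
      List.nil_append, List.map_map]
    simp only [List.mem_map, Function.comp_def]
    exact ⟨i, hi, rfl⟩
  show (PySem.Dict.mk _).items = (PySem.Dict.mk _).items
  rw [show (PySem.Dict.empty : PySem.Dict Int Int).items = [] from rfl]
  simp only [List.nil_append]
  apply List.map_congr_left
  intro i hi
  have hmem := (PySem.List.mem_pyRange_one).mp hi
  rw [bisect_eq_countP _ i hchain]
  rfl

theorem distribute_lines_by_blocks_py_spec : Claim_equal_distribute_lines_by_blocks_py := by
  unfold Claim_equal_distribute_lines_by_blocks_py
  intro start_line end_line start_page end_page page_block_counts _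
  unfold Spec_distribute_lines_by_blocks_py
  unfold distribute_lines_by_blocks_py distribute_lines_by_blocks_py_alt
  simp only []
  split_ifs with h1 h2 h3 h4 h5 h6 h7 <;> try rfl
  all_goals try omega
  all_goals {
    refine main_branch start_line end_line end_page _ _ _ _ (by omega) ?_ ?_
    · have hlen : (PySem.List.pyRange start_page (end_page + 1) 1).length
          = (end_page + 1 - start_page).toNat := PySem.List.length_pyRange_one _ _
      intro hnil
      rw [hnil] at hlen
      simp at hlen
      omega
    · simp
  }
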